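-- pv_equiv track=rewrite | github.com/ggzor/EightQueens | 8QueensGen.py | linearize
-- ===== SOURCE A (Python) =====
-- def linearize(x, ls):
--     def go(x, it):
--         if x > 0:
--             g = []
--             for _ in range(x):
--                 g.append(next(it))
--             yield g
--
--             yield from go(x - 1, it)
--
--     return go(x, iter(ls))
-- ===== SOURCE B (Python) =====
-- def linearize(x, ls):
--     def gen():
--         it = iter(ls)
--         for size in range(x, 0, -1):
--             yield [next(it) for _ in range(size)]
--     return gen()
-- ===== Notes on version B (the rewrite author's own statement) =====
-- stated objective: idiomatic
-- what changed: Replaced the tail-recursive nested generator (recursing with yield from on x-1) by a single flat generator that loops over range(x, 0, -1) and builds each chunk with a comprehension pulling from one shared iterator.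
import Mathlib
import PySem

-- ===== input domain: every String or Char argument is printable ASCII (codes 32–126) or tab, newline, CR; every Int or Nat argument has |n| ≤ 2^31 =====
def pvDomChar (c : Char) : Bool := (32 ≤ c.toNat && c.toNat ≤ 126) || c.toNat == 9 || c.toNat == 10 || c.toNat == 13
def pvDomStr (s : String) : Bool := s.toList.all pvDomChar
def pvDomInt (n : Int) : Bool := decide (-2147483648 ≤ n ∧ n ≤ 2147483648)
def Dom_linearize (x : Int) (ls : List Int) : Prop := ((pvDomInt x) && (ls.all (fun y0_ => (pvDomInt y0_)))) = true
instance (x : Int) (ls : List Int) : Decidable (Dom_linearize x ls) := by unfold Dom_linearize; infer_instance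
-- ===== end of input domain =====

-- B replaces A's tail-recursive nested generator by one flat loop over range(x,0,-1)
-- pulling each chunk from a shared iterator (idiomatic; same cost). The Python values
-- are generators; the equivalence is about the sequence of chunks they yield.

-- ===== PORT A =====
-- go(x, it): if x > 0, pull x items from the iterator as one chunk, then recurse on x-1.
def linearizeGo (x : Int) (it : List Int) : List (List Int) :=
  if _h : x > 0 then
    (it.take x.toNat) :: linearizeGo (x - 1) (it.drop x.toNat)
  else []
termination_by x.toNat
decreasing_by omega

def linearize (x : Int) (ls : List Int) : List (List Int) := linearizeGo x ls

-- ===== PORT B =====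
-- for size in range(x, 0, -1): yield [next(it) for _ in range(size)]
-- state = (chunks yielded so far, rest of the iterator)
def linearize_alt (x : Int) (ls : List Int) : List (List Int) :=
  ((PySem.List.pyRange x 0 (-1)).foldl
    (fun (st : List (List Int) × List Int) size =>
      (st.1 ++ [st.2.take size.toNat], st.2.drop size.toNat))
    ([], ls)).1

-- ===== PRECONDITION & SPEC =====
-- Pre_ excludes exactly the inputs where consuming A's generator raises
-- (RuntimeError from an exhausted iterator): x > 0 with fewer than x+(x-1)+...+1 elements.
def Pre_linearize (x : Int) (ls : List Int) : Prop :=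
  x ≤ 0 ∨ x * (x + 1) ≤ 2 * (ls.length : Int)
instance (x : Int) (ls : List Int) : Decidable (Pre_linearize x ls) := by
  unfold Pre_linearize; infer_instance

def pvWitness_linearize : Int × List Int := (3, [1, 2, 3, 4, 5, 6])

def Spec_linearize (x : Int) (ls : List Int) (out : List (List Int)) : Prop := out = linearize_alt x ls
instance (x : Int) (ls : List Int) (out : List (List Int)) : Decidable (Spec_linearize x ls out) := by unfold Spec_linearize; infer_instance

-- ===== CLAIM (what is proved, stated in full; the proofs are below) =====
def Claim_equal_linearize : Prop := ∀ (x : Int) (ls : List Int), Dom_linearize x ls → Pre_linearize x ls → Spec_linearize x ls (linearize x ls)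

-- ===== LEMMAS AND PROOFS =====
theorem linearizeGo_foldl (n : Nat) : ∀ (x : Int), x.toNat = n → ∀ (it : List Int) (acc : List (List Int)),
    ((PySem.List.pyRange x 0 (-1)).foldl
      (fun (st : List (List Int) × List Int) size =>
        (st.1 ++ [st.2.take size.toNat], st.2.drop size.toNat))
      (acc, it)).1 = acc ++ linearizeGo x it := by
  induction n with
  | zero =>
    intro x hx it acc
    have hx0 : x ≤ 0 := by omega
    rw [PySem.List.pyRange_neg_one_eq_nil hx0, linearizeGo,
        dif_neg (not_lt.mpr hx0)]
    simp
  | succ m ih =>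
    intro x hx it acc
    have hx0 : (0 : Int) < x := by omega
    rw [PySem.List.pyRange_neg_one_cons hx0, List.foldl_cons,
        ih (x - 1) (by omega)]
    conv_rhs => rw [linearizeGo, dif_pos hx0]
    simp

theorem linearize_spec : Claim_equal_linearize := by
  intro x ls _ _
  unfold Spec_linearize linearize linearize_alt
  rw [linearizeGo_foldl x.toNat x rfl ls []]
  simp
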